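-- pv_equiv track=rewrite | github.com/qlalfdmlghk1/Algorism_Python | programers/풀이성공/햄버거 만들기.py | solution
-- ===== SOURCE A (Python) =====
-- def solution(ingredient):
--     answer = 0
--     stack = []
--     for ingre in ingredient :
--         stack.append(ingre)
--         if ingre == 1 and len(stack) >= 4 :  # 1이면 앞의 4개 확인
--             if stack[-4:] == [1, 2, 3, 1] :
--                 stack.pop()
--                 stack.pop()
--                 stack.pop()
--                 stack.pop()
--                 answer += 1
--
--     return answer
-- ===== SOURCE B (Python) =====
-- def solution(ingredient):
--     def remove_first(xs):
--         # leftmost four-element window equal to [1, 2, 3, 1], removed; None if absent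
--         for i in range(len(xs) - 3):
--             if xs[i:i+4] == [1, 2, 3, 1]:
--                 return xs[:i] + xs[i+4:]
--         return None
--     answer = 0
--     xs = ingredient
--     while True:
--         ys = remove_first(xs)
--         if ys is None:
--             return answer
--         xs = ys
--         answer += 1
-- ===== Notes on version B (the rewrite author's own statement) =====
-- stated objective: alternative
-- what changed: Replaces the single-pass stack reduction by repeated scanning: find the leftmost [1,2,3,1] window, delete it, restart; counts agree by confluence of the pattern-deletion rewriting.
import Mathlib
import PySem

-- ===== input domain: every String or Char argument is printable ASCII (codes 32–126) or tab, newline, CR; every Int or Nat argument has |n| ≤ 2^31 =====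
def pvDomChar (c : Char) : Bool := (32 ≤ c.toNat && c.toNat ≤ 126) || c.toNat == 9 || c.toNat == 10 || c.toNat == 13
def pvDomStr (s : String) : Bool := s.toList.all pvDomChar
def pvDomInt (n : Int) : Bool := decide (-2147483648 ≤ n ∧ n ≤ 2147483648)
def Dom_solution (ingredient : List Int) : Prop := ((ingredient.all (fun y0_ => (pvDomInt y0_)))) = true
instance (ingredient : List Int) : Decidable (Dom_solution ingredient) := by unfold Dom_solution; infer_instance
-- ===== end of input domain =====

-- B replaces A's single-pass stack reduction by repeated leftmost-window deletion (same count, no speed claim).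

-- ===== PORT A =====
-- one iteration of A's for-loop: push, then maybe pop the top four and count
def solStep (st : List Int × Int) (ingre : Int) : List Int × Int :=
  let stack := st.1 ++ [ingre]
  if ingre = 1 ∧ stack.length ≥ 4 then
    if PySem.List.slice stack (some (-4)) none = ([1, 2, 3, 1] : List Int) then
      (stack.dropLast.dropLast.dropLast.dropLast, st.2 + 1)
    else (stack, st.2)
  else (stack, st.2)

def solution (ingredient : List Int) : Int :=
  (ingredient.foldl solStep ([], 0)).2

-- ===== PORT B =====
-- Source B's remove_first: leftmost window equal to [1,2,3,1] removed, None if absent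
def removeFirst (xs : List Int) : Option (List Int) :=
  match xs with
  | [] => none
  | x :: rest =>
    if x = 1 ∧ rest.take 3 = [2, 3, 1] then some (rest.drop 3)
    else (removeFirst rest).map (x :: ·)

theorem removeFirst_cons (x : Int) (rest : List Int) :
    removeFirst (x :: rest) =
      if x = 1 ∧ rest.take 3 = [2, 3, 1] then some (rest.drop 3)
      else (removeFirst rest).map (x :: ·) := rfl

theorem removeFirst_some_length : ∀ (xs ys : List Int), removeFirst xs = some ys →
    ys.length + 4 = xs.length := by
  intro xs
  induction xs with
  | nil => intro ys h; simp [removeFirst] at h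
  | cons x rest ih =>
    intro ys h
    rw [removeFirst_cons] at h
    split_ifs at h with hc
    · have h3 : rest.length ≥ 3 := by
        have := congrArg List.length hc.2
        simp [List.length_take] at this
        omega
      simp at h
      subst h
      simp
      omega
    · simp [Option.map_eq_some_iff] at h
      obtain ⟨ys', hy, rfl⟩ := h
      have := ih ys' hy
      simp
      omega

-- Source B's outer while-loop, accumulating answer
def altLoop (xs : List Int) (answer : Int) : Int :=
  match h : removeFirst xs with
  | none => answer
  | some ys => altLoop ys (answer + 1)
termination_by xs.length
decreasing_by
  have := removeFirst_some_length xs ys h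
  omega

def solution_alt (ingredient : List Int) : Int :=
  altLoop ingredient 0

-- ===== PRECONDITION & SPEC =====
def Spec_solution (ingredient : List Int) (out : Int) : Prop := out = solution_alt ingredient
instance (ingredient : List Int) (out : Int) : Decidable (Spec_solution ingredient out) := by unfold Spec_solution; infer_instance

-- ===== CLAIM (what is proved, stated in full; the proofs are below) =====
def Claim_equal_solution : Prop := ∀ (ingredient : List Int), Dom_solution ingredient → Spec_solution ingredient (solution ingredient)

-- ===== LEMMAS AND PROOFS =====

-- any list containing the pattern has a removable window
theorem removeFirst_append_pat : ∀ (a b : List Int),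
    ∃ r, removeFirst (a ++ 1 :: 2 :: 3 :: 1 :: b) = some r := by
  intro a b
  induction a with
  | nil => exact ⟨b, by simp [removeFirst]⟩
  | cons x a' ih =>
    obtain ⟨r, hr⟩ := ih
    simp only [List.cons_append]
    rw [removeFirst_cons]
    split_ifs with hc
    · exact ⟨_, rfl⟩
    · exact ⟨x :: r, by simp [hr]⟩

-- decomposition: removeFirst finds the LEFTMOST window
theorem removeFirst_spec : ∀ (xs ys : List Int), removeFirst xs = some ys →
    ∃ u v, xs = u ++ 1 :: 2 :: 3 :: 1 :: v ∧ ys = u ++ v ∧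
      removeFirst (u ++ [1, 2, 3]) = none := by
  intro xs
  induction xs with
  | nil => intro ys h; simp [removeFirst] at h
  | cons x rest ih =>
    intro ys h
    rw [removeFirst_cons] at h
    split_ifs at h with hc
    · injection h with h'
      refine ⟨[], rest.drop 3, ?_, h'.symm ▸ rfl, by decide⟩
      have hr : rest = 2 :: 3 :: 1 :: rest.drop 3 := by
        have := (List.take_append_drop 3 rest).symm
        rw [hc.2] at this
        simpa using this
      rw [hc.1]
      conv_lhs => rw [hr]
      simp
    · simp [Option.map_eq_some_iff] at h
      obtain ⟨ys', hy, rfl⟩ := h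
      obtain ⟨u', v', hxs, hys, hnone⟩ := ih ys' hy
      refine ⟨x :: u', v', by simp [hxs], by simp [hys], ?_⟩
      -- show the head does not start a window in x :: u' ++ [1,2,3]
      have hcfalse : ¬(x = 1 ∧ (u' ++ [1, 2, 3]).take 3 = [2, 3, 1]) := by
        rintro ⟨hx1, ht⟩
        subst hxs
        match u' with
        | [] => simp at ht
        | [a] => simp at ht
        | [a, b] =>
          simp at ht
          exact hc ⟨hx1, by simp [ht.1, ht.2]⟩
        | a :: b :: c :: u'' =>
          have : (a :: b :: c :: u'' ++ [1, 2, 3]).take 3 = [a, b, c] := by simp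
          rw [this] at ht
          refine hc ⟨hx1, ?_⟩
          simp at ht ⊢
          exact ⟨ht.1, ht.2.1, ht.2.2⟩
      simp only [List.cons_append]
      rw [removeFirst_cons, if_neg hcfalse, hnone]
      rfl

-- the counter of A's fold is additive in the initial answer
theorem foldl_solStep_add : ∀ (l : List Int) (s : List Int) (a : Int),
    List.foldl solStep (s, a) l =
      ((List.foldl solStep (s, 0) l).1, a + (List.foldl solStep (s, 0) l).2) := by
  intro l
  induction l with
  | nil => intro s a; simp
  | cons x l' ih =>
    intro s a
    have hstep : solStep (s, a) x = ((solStep (s, 0) x).1, a + (solStep (s, 0) x).2) := by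
      unfold solStep
      dsimp only
      split_ifs <;> simp
    simp only [List.foldl_cons, hstep]
    rw [ih (solStep (s, 0) x).1 (a + (solStep (s, 0) x).2),
        ih (solStep (s, 0) x).1 (solStep (s, 0) x).2]
    simp
    ring

-- while no window can complete, A's fold just pushes
theorem foldl_solStep_nopat : ∀ (u s c : List Int) (a : Int),
    removeFirst (s ++ u ++ c) = none →
    List.foldl solStep (s, a) u = (s ++ u, a) := by
  intro u
  induction u with
  | nil => intro s c a _; simp
  | cons x u' ih =>
    intro s c a h
    have hcond : ¬((s ++ [x]).length ≥ 4 ∧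
        PySem.List.slice (s ++ [x]) (some (-4)) none = ([1, 2, 3, 1] : List Int)) := by
      rintro ⟨hlen, hslice⟩
      rw [PySem.List.slice_from_neg_ofNat (s ++ [x]) 4 (by omega)] at hslice
      have hdec : s ++ [x] = (s ++ [x]).take ((s ++ [x]).length - 4) ++ [1, 2, 3, 1] := by
        rw [← hslice]; exact (List.take_append_drop _ _).symm
      obtain ⟨r, hr⟩ := removeFirst_append_pat ((s ++ [x]).take ((s ++ [x]).length - 4))
        (u' ++ c)
      have : s ++ (x :: u') ++ c = ((s ++ [x]).take ((s ++ [x]).length - 4)) ++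
          1 :: 2 :: 3 :: 1 :: (u' ++ c) := by
        have : s ++ (x :: u') ++ c = (s ++ [x]) ++ (u' ++ c) := by simp
        rw [this, hdec]; simp
      rw [this, hr] at h
      simp at h
    have hstep : solStep (s, a) x = (s ++ [x], a) := by
      unfold solStep
      dsimp only
      split_ifs with h1 h2
      · exact absurd ⟨h1.2, h2⟩ hcond
      · rfl
      · rfl
    simp only [List.foldl_cons, hstep]
    have hrec := ih (s ++ [x]) c a (by simpa using h)
    rw [hrec]
    simp

-- dropping the last four of w ++ [a,b,c,d] gives w
theorem dropLast4 : ∀ (w : List Int) (a b c d : Int),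
    (w ++ [a, b, c, d]).dropLast.dropLast.dropLast.dropLast = w := by
  intro w a b c d
  have h1 : w ++ [a, b, c, d] = (w ++ [a, b, c]) ++ [d] := by simp
  have h2 : w ++ [a, b, c] = (w ++ [a, b]) ++ [c] := by simp
  have h3 : w ++ [a, b] = (w ++ [a]) ++ [b] := by simp
  rw [h1, List.dropLast_concat, h2, List.dropLast_concat, h3, List.dropLast_concat,
    List.dropLast_concat]

def sol2 (xs : List Int) : Int := (List.foldl solStep ([], 0) xs).2

-- one leftmost removal decrements A's count by one
theorem sol2_removeFirst : ∀ (xs ys : List Int), removeFirst xs = some ys →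
    sol2 xs = sol2 ys + 1 := by
  intro xs ys h
  obtain ⟨u, v, hxs, hys, hnone⟩ := removeFirst_spec xs ys h
  have hu : ∀ a : Int, List.foldl solStep ([], a) u = (u, a) := by
    intro a
    have := foldl_solStep_nopat u [] [1, 2, 3] a (by simpa using hnone)
    simpa using this
  -- processing the window [1,2,3,1] from stack u pops exactly once
  have hstep1 : solStep (u, (0 : Int)) 1 = (u ++ [1], 0) := by
    unfold solStep
    dsimp only
    split_ifs with h1 h2
    · exfalso
      rw [PySem.List.slice_from_neg_ofNat (u ++ [1]) 4 (by omega)] at h2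
      have hdec : u ++ [1] = (u ++ [1]).take ((u ++ [1]).length - 4) ++ [1, 2, 3, 1] := by
        rw [← h2]; exact (List.take_append_drop _ _).symm
      -- then u ends with [1,2,3], so u ++ [1,2,3] contains the pattern
      have hu123 : u = (u ++ [1]).take ((u ++ [1]).length - 4) ++ [1, 2, 3] := by
        have : u ++ [1] = ((u ++ [1]).take ((u ++ [1]).length - 4) ++ [1, 2, 3]) ++ [1] := by
          rw [hdec]; simp
        exact List.append_cancel_right (by simpa using this)
      obtain ⟨r, hr⟩ := removeFirst_append_pat ((u ++ [1]).take ((u ++ [1]).length - 4))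
        [2, 3]
      have : u ++ [1, 2, 3] = (u ++ [1]).take ((u ++ [1]).length - 4) ++
          1 :: 2 :: 3 :: 1 :: [2, 3] := by
        rw [hu123]; simp
      rw [this, hr] at hnone
      simp at hnone
    · rfl
    · rfl
  have hstep2 : solStep ((u ++ [1]), (0 : Int)) 2 = (u ++ [1, 2], 0) := by
    unfold solStep; dsimp only; rw [if_neg (by simp)]; simp
  have hstep3 : solStep ((u ++ [1, 2]), (0 : Int)) 3 = (u ++ [1, 2, 3], 0) := by
    unfold solStep; dsimp only; rw [if_neg (by simp)]; simp
  have hstep4 : solStep ((u ++ [1, 2, 3]), (0 : Int)) 1 = (u, 1) := by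
    unfold solStep
    dsimp only
    have hlen : (u ++ [1, 2, 3] ++ [1]).length ≥ 4 := by simp
    have hslice : PySem.List.slice (u ++ [1, 2, 3] ++ [1]) (some (-4)) none =
        ([1, 2, 3, 1] : List Int) := by
      rw [PySem.List.slice_from_neg_ofNat _ 4 (by omega)]
      have h1 : u ++ [1, 2, 3] ++ [1] = u ++ [1, 2, 3, 1] := by simp
      have h2 : (u ++ [1, 2, 3, 1]).length - 4 = u.length := by simp
      rw [h1, h2, List.drop_left]
    rw [if_pos ⟨rfl, hlen⟩, if_pos hslice]
    have : u ++ [1, 2, 3] ++ [1] = u ++ [1, 2, 3, 1] := by simp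
    rw [this, dropLast4]
    norm_num
  have hpat : List.foldl solStep (u, (0 : Int)) [1, 2, 3, 1] = (u, 1) := by
    simp only [List.foldl_cons, List.foldl_nil, hstep1, hstep2, hstep3]
    · exact hstep4
  -- assemble
  have hx : sol2 xs = (List.foldl solStep (u, 1) v).2 := by
    unfold sol2
    rw [hxs]
    have : (u ++ 1 :: 2 :: 3 :: 1 :: v) = u ++ ([1, 2, 3, 1] ++ v) := by simp
    rw [this, List.foldl_append, hu, List.foldl_append, hpat]
  have hy : sol2 ys = (List.foldl solStep (u, 0) v).2 := by
    unfold sol2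
    rw [hys, List.foldl_append, hu]
  rw [hx, hy, foldl_solStep_add v u 1]
  ring

theorem sol2_none : ∀ (xs : List Int), removeFirst xs = none → sol2 xs = 0 := by
  intro xs h
  unfold sol2
  have := foldl_solStep_nopat xs [] [] 0 (by simpa using h)
  simp at this
  rw [this]

theorem altLoop_eq : ∀ (n : ℕ) (xs : List Int), xs.length = n → ∀ (a : Int),
    altLoop xs a = a + sol2 xs := by
  intro n
  induction n using Nat.strong_induction_on with
  | _ n ih =>
    intro xs hlen a
    unfold altLoop
    split
    · next h => rw [sol2_none xs h]; ring
    · next ys h =>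
      have hl := removeFirst_some_length xs ys h
      have := ih ys.length (by omega) ys rfl (a + 1)
      rw [this, sol2_removeFirst xs ys h]
      ring

-- ===== VERDICT (by name: the statement is the Claim_ definition above) =====
theorem solution_spec : Claim_equal_solution := by
  intro ingredient _
  unfold Spec_solution solution solution_alt
  rw [altLoop_eq ingredient.length ingredient rfl 0]
  unfold sol2
  ring
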